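-- pv_equiv track=rewrite | github.com/alexanderk001/nash-equilibrium | src/nash.py | best_response_player1
-- ===== SOURCE A (Python) =====
-- def best_response_player1(matrix):
--     """Find the best responses for Player 1."""
--     best_responses = []
--
--     for col in range(len(matrix[0])):
--         max_payoff = max(row[col][0] for row in matrix)
--         best_responses.extend(
--             [(row_idx, col) for row_idx, row in enumerate(matrix) if row[col][0] == max_payoff]
--         )
--     return best_responses
-- ===== SOURCE B (Python) =====
-- def best_response_player1(matrix):
--     """Find the best responses for Player 1 (single pass per column with a running max)."""
--     best_responses = []
--     for col in range(len(matrix[0])):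
--         max_payoff = None
--         col_best = []
--         for row_idx, row in enumerate(matrix):
--             v = row[col][0]
--             if max_payoff is None or v > max_payoff:
--                 max_payoff = v
--                 col_best = [(row_idx, col)]
--             elif v == max_payoff:
--                 col_best.append((row_idx, col))
--         best_responses.extend(col_best)
--     return best_responses
-- ===== Notes on version B (the rewrite author's own statement) =====
-- stated objective: alternative
-- what changed: Per column, A's two passes (a max() scan, then a filtering comprehension over all rows) are replaced by a single pass over the rows that maintains a running maximum and the current list of argmax cells, resetting it on a strictly greater payoff and appending on a tie.
import Mathlib
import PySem

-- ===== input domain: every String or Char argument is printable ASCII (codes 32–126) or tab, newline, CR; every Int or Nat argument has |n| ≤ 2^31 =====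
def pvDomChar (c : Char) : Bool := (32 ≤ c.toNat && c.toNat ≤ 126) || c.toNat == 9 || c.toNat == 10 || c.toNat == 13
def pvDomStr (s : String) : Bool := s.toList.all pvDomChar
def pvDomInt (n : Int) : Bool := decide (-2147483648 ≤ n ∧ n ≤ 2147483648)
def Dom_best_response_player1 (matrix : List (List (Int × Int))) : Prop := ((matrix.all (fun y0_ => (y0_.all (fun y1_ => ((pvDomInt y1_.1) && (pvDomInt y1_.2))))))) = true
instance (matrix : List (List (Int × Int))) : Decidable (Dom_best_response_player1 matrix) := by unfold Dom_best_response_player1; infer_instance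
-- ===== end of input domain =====

-- B replaces A's two passes per column (max() then a filtering comprehension) by one pass
-- keeping a running maximum and the current argmax cells (objective: alternative decomposition).

-- ===== PORT A =====
-- row[col][0], exact on Pre_ (col in range for every row); the .getD default is never reached there
def pvVal (col : Int) (row : List (Int × Int)) : Int :=
  ((PySem.List.pyGet? row col).getD (0, 0)).1

def best_response_player1 (matrix : List (List (Int × Int))) : List (Int × Int) :=
  (PySem.List.pyRange 0 ((matrix.headD []).length : Int) 1).foldl
    (fun best_responses col =>
      match PySem.List.max? (matrix.map (fun row => pvVal col row)) (fun v => v) with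
      | none => best_responses      -- Python: max() on empty raises; excluded by Pre_
      | some max_payoff =>
          best_responses ++
            ((PySem.List.enumerate matrix 0).filter
              (fun p => pvVal col p.2 == max_payoff)).map (fun p => (p.1, col)))
    []

-- ===== PORT B =====
-- one step of B's inner row loop: running max (none before the first row) + current best cells
def pvStep (col : Int) (s : Option Int × List (Int × Int)) (p : Int × List (Int × Int)) :
    Option Int × List (Int × Int) :=
  let v := pvVal col p.2
  match s.1 with
  | none => (some v, [(p.1, col)])
  | some m =>
      if v > m then (some v, [(p.1, col)])
      else if v == m then (some m, s.2 ++ [(p.1, col)])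
      else s

def best_response_player1_alt (matrix : List (List (Int × Int))) : List (Int × Int) :=
  (PySem.List.pyRange 0 ((matrix.headD []).length : Int) 1).foldl
    (fun best_responses col =>
      best_responses ++ ((PySem.List.enumerate matrix 0).foldl (pvStep col) (none, [])).2)
    []

-- ===== PRECONDITION & SPEC =====
-- A evaluates matrix[0] and row[col] for every row and col < len(matrix[0]): it raises
-- IndexError iff matrix is empty or some row is shorter than the first one.
def Pre_best_response_player1 (matrix : List (List (Int × Int))) : Prop :=
  matrix ≠ [] ∧ ∀ row ∈ matrix, (matrix.headD []).length ≤ row.length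
instance (matrix : List (List (Int × Int))) : Decidable (Pre_best_response_player1 matrix) := by
  unfold Pre_best_response_player1; infer_instance

def pvWitness_best_response_player1 : (List (List (Int × Int))) :=
  [[(1, 0), (2, 0)], [(1, 1), (0, 3)]]

def Spec_best_response_player1 (matrix : List (List (Int × Int))) (out : List (Int × Int)) : Prop :=
  out = best_response_player1_alt matrix
instance (matrix : List (List (Int × Int))) (out : List (Int × Int)) :
    Decidable (Spec_best_response_player1 matrix out) := by
  unfold Spec_best_response_player1; infer_instance

-- ===== CLAIM (what is proved, stated in full; the proofs are below) =====
def Claim_equal_best_response_player1 : Prop :=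
  ∀ (matrix : List (List (Int × Int))), Dom_best_response_player1 matrix →
    Pre_best_response_player1 matrix →
      Spec_best_response_player1 matrix (best_response_player1 matrix)

-- ===== LEMMAS AND PROOFS =====

-- invariant of B's inner loop once the running max is `some m`
theorem pvStep_inv (col : Int) (ps : List (Int × List (Int × Int))) :
    ∀ (m : Int) (acc : List (Int × Int)),
      ps.foldl (pvStep col) (some m, acc) =
        (some (ps.foldl (fun a p => max a (pvVal col p.2)) m),
         (if ps.foldl (fun a p => max a (pvVal col p.2)) m = m then acc else []) ++
           (ps.filter (fun p => pvVal col p.2 == ps.foldl (fun a p => max a (pvVal col p.2)) m)).map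
             (fun p => (p.1, col))) := by
  induction ps with
  | nil => intro m acc; simp
  | cons p ps ih =>
    intro m acc
    rw [List.foldl_cons]
    rcases lt_trichotomy (pvVal col p.2) m with hlt | heq | hgt
    · -- v < m : state unchanged
      have hstep : pvStep col (some m, acc) p = (some m, acc) := by
        simp only [pvStep]
        rw [if_neg (by omega), if_neg (by simp only [beq_iff_eq]; omega)]
      have hM : m ≤ ps.foldl (fun a p => max a (pvVal col p.2)) m :=
        (PySem.List.le_foldl_max_int ps (fun p => pvVal col p.2) m).1
      have h1 : max m (pvVal col p.2) = m := by omega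
      have hcond : (pvVal col p.2 == ps.foldl (fun a p => max a (pvVal col p.2)) m) = false := by
        simp only [beq_eq_false_iff_ne]; omega
      rw [hstep, ih m acc]
      simp only [h1, List.foldl_cons, List.filter_cons, hcond]
      simp
    · -- v = m : append
      have hstep : pvStep col (some m, acc) p = (some m, acc ++ [(p.1, col)]) := by
        simp only [pvStep]
        rw [if_neg (by omega), if_pos (by simp only [beq_iff_eq]; omega)]
      have h1 : max m (pvVal col p.2) = m := by omega
      rw [hstep, ih m (acc ++ [(p.1, col)])]
      simp only [h1, List.foldl_cons, List.filter_cons]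
      by_cases hMm : ps.foldl (fun a p => max a (pvVal col p.2)) m = m
      · have hcond : (pvVal col p.2 == ps.foldl (fun a p => max a (pvVal col p.2)) m) = true := by
          simp only [beq_iff_eq]; omega
        simp [hMm, heq]
      · have hcond : (pvVal col p.2 == ps.foldl (fun a p => max a (pvVal col p.2)) m) = false := by
          simp only [beq_eq_false_iff_ne]; omega
        simp [hMm, hcond]
    · -- v > m : reset
      have hstep : pvStep col (some m, acc) p = (some (pvVal col p.2), [(p.1, col)]) := by
        simp only [pvStep]
        rw [if_pos (by omega)]
      have h1 : max m (pvVal col p.2) = pvVal col p.2 := by omega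
      have hle : pvVal col p.2 ≤ ps.foldl (fun a p => max a (pvVal col p.2)) (pvVal col p.2) :=
        (PySem.List.le_foldl_max_int ps (fun p => pvVal col p.2) (pvVal col p.2)).1
      have hne : ¬ ps.foldl (fun a p => max a (pvVal col p.2)) (pvVal col p.2) = m := by omega
      rw [hstep, ih (pvVal col p.2) [(p.1, col)]]
      simp only [h1, List.foldl_cons, List.filter_cons]
      by_cases hMv : ps.foldl (fun a p => max a (pvVal col p.2)) (pvVal col p.2) = pvVal col p.2
      · have hvne : ¬ pvVal col p.2 = m := by omega
        simp [hMv, hvne]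
      · have hcond : (pvVal col p.2 ==
            ps.foldl (fun a p => max a (pvVal col p.2)) (pvVal col p.2)) = false := by
          simp only [beq_eq_false_iff_ne]; omega
        simp [hMv, hne, hcond]

-- the two per-column bodies agree on a nonempty matrix
theorem pvCol_eq (r : List (Int × Int)) (rest : List (List (Int × Int))) (col : Int) :
    ((PySem.List.enumerate (r :: rest) 0).filter
        (fun p => pvVal col p.2 ==
          (rest.map (fun row => pvVal col row)).foldl max (pvVal col r))).map
      (fun p => (p.1, col)) =
    ((PySem.List.enumerate (r :: rest) 0).foldl (pvStep col) (none, [])).2 := by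
  have hfold : (rest.map (fun row => pvVal col row)).foldl max (pvVal col r) =
      (PySem.List.enumerate rest 1).foldl (fun a p => max a (pvVal col p.2)) (pvVal col r) := by
    have h2 : ((PySem.List.enumerate rest 1).map (fun p => p.2)).foldl
        (fun (a : Int) y => max a (pvVal col y)) (pvVal col r) =
        (PySem.List.enumerate rest 1).foldl (fun a p => max a (pvVal col p.2)) (pvVal col r) := by
      rw [List.foldl_map]
    rw [PySem.List.map_snd_enumerate] at h2
    rw [List.foldl_map]
    exact h2
  have hstep0 : pvStep col (none, []) ((0 : Int), r) = (some (pvVal col r), [((0 : Int), col)]) := rfl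
  have hle : pvVal col r ≤
      (PySem.List.enumerate rest 1).foldl (fun a p => max a (pvVal col p.2)) (pvVal col r) :=
    (PySem.List.le_foldl_max_int (PySem.List.enumerate rest 1) _ (pvVal col r)).1
  rw [PySem.List.enumerate_cons]
  simp only [hfold, zero_add]
  rw [List.foldl_cons, hstep0,
    pvStep_inv col (PySem.List.enumerate rest 1) (pvVal col r) [((0 : Int), col)],
    List.filter_cons]
  by_cases hM : (PySem.List.enumerate rest 1).foldl (fun a p => max a (pvVal col p.2))
      (pvVal col r) = pvVal col r
  · have hcond : (pvVal col r ==
        (PySem.List.enumerate rest 1).foldl (fun a p => max a (pvVal col p.2)) (pvVal col r)) = true := by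
      simp only [beq_iff_eq]; omega
    simp [hM]
  · have hcond : (pvVal col r ==
        (PySem.List.enumerate rest 1).foldl (fun a p => max a (pvVal col p.2)) (pvVal col r)) = false := by
      simp only [beq_eq_false_iff_ne]; omega
    simp [hM, hcond]

-- the two outer column loops agree step by step
theorem pvOuter_eq (r : List (Int × Int)) (rest : List (List (Int × Int))) :
    ∀ (l : List Int) (acc : List (Int × Int)),
      l.foldl (fun best_responses col =>
          match PySem.List.max? ((r :: rest).map (fun row => pvVal col row)) (fun v => v) with
          | none => best_responses
          | some max_payoff =>
              best_responses ++
                ((PySem.List.enumerate (r :: rest) 0).filter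
                  (fun p => pvVal col p.2 == max_payoff)).map (fun p => (p.1, col))) acc =
      l.foldl (fun best_responses col =>
          best_responses ++
            ((PySem.List.enumerate (r :: rest) 0).foldl (pvStep col) (none, [])).2) acc := by
  intro l
  induction l with
  | nil => intro acc; rfl
  | cons c l ih =>
    intro acc
    have hbody : (match PySem.List.max? ((r :: rest).map (fun row => pvVal c row)) (fun v => v) with
        | none => acc
        | some max_payoff =>
            acc ++
              ((PySem.List.enumerate (r :: rest) 0).filter
                (fun p => pvVal c p.2 == max_payoff)).map (fun p => (p.1, c))) =
        acc ++ ((PySem.List.enumerate (r :: rest) 0).foldl (pvStep c) (none, [])).2 := by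
      rw [List.map_cons, PySem.List.max?_id_cons]
      exact congrArg (acc ++ ·) (pvCol_eq r rest c)
    simp only [List.foldl_cons]
    rw [hbody]
    exact ih _

-- ===== VERDICT (by name: the statement is the Claim_ definition above) =====
theorem best_response_player1_spec : Claim_equal_best_response_player1 := by
  intro matrix _ hpre
  obtain ⟨r, rest, rfl⟩ := List.exists_cons_of_ne_nil hpre.1
  show best_response_player1 _ = best_response_player1_alt _
  unfold best_response_player1 best_response_player1_alt
  exact pvOuter_eq r rest _ []
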